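-- pv_equiv track=rewrite | github.com/siegetechnologies/virtue | linux/rest/strutil.py | roleidwhite
-- ===== SOURCE A (Python) =====
-- import string
--
-- alphanum = string.ascii_letters + string.digits
--
-- roleidwhitelist = alphanum + '.' + '_' + '-'
--
-- def roleidwhite(inps):
-- 	if not inps:
-- 		return False
-- 	#so someone cant duplicate the efsnfs
-- 	if inps == 'efsnfsproxy':
-- 		return False
-- 	if inps[0] not in alphanum or inps[-1] not in alphanum:
-- 		return False
-- 	return all (c in roleidwhitelist for c in inps )
-- ===== SOURCE B (Python) =====
-- import re
--
-- _ROLE_RE = re.compile(r'[A-Za-z0-9](?:[A-Za-z0-9._-]*[A-Za-z0-9])?\Z')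
--
-- def roleidwhite(inps):
--     if not inps:
--         return False
--     if inps == 'efsnfsproxy':
--         return False
--     return _ROLE_RE.match(inps) is not None
-- ===== Notes on version B (the rewrite author's own statement) =====
-- stated objective: idiomatic
-- what changed: Replaces the explicit first/last membership checks plus per-character whitelist scan with a single anchored compiled-regex match (first char alphanumeric, optional middle of whitelist chars ending in an alphanumeric), keeping the empty-string and sentinel guards.
import Mathlib
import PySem

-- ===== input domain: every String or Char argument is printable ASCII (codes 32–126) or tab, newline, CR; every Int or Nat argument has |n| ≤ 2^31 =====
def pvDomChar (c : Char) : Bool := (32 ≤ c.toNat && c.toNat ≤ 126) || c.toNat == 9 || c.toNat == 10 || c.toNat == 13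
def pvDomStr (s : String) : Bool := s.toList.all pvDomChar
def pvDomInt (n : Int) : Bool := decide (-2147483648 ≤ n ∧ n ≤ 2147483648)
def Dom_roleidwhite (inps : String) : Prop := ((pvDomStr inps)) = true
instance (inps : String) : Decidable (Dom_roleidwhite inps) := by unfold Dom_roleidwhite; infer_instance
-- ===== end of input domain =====

-- B replaces the per-character loop and separate first/last checks with a single anchored
-- regex match (ported by hand as a recursive matcher); same return value, idiomatic rewrite.

-- module constants: alphanum = string.ascii_letters + string.digits; roleidwhitelist = alphanum + '._-'
def pyAlphanum : List Char :=
  "abcdefghijklmnopqrstuvwxyzABCDEFGHIJKLMNOPQRSTUVWXYZ0123456789".toList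
def pyRoleWhitelist : List Char := pyAlphanum ++ "._-".toList

-- ===== PORT A =====
def roleidwhite (inps : String) : Bool :=
  match inps.toList with
  | [] => false                                  -- if not inps: return False
  | c0 :: rest =>
    if inps = "efsnfsproxy" then false
    else if !(pyAlphanum.contains c0)
            || !(pyAlphanum.contains ((c0 :: rest).getLast (by simp))) then false
    else (c0 :: rest).all (fun c => pyRoleWhitelist.contains c)

-- ===== PORT B =====
-- hand port of re.fullmatch-style anchored regex r'[A-Za-z0-9](?:[A-Za-z0-9._-]*[A-Za-z0-9])?\Z':
-- reTail matches '[A-Za-z0-9._-]*[A-Za-z0-9]' on a nonempty suffix; exact for this regex on any string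
def reTail : List Char → Bool
  | [] => false
  | [c] => pyAlphanum.contains c
  | c :: c' :: rest => pyRoleWhitelist.contains c && reTail (c' :: rest)

def reRole : List Char → Bool
  | [] => false
  | c :: rest => pyAlphanum.contains c && (rest.isEmpty || reTail rest)

def roleidwhite_alt (inps : String) : Bool :=
  if inps.toList.isEmpty then false
  else if inps = "efsnfsproxy" then false
  else reRole inps.toList

-- ===== PRECONDITION & SPEC =====
def Spec_roleidwhite (inps : String) (out : Bool) : Prop := out = roleidwhite_alt inps
instance (inps : String) (out : Bool) : Decidable (Spec_roleidwhite inps out) := by unfold Spec_roleidwhite; infer_instance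

-- ===== CLAIM (what is proved, stated in full; the proofs are below) =====
def Claim_equal_roleidwhite : Prop := ∀ (inps : String), Dom_roleidwhite inps → Spec_roleidwhite inps (roleidwhite inps)

-- ===== LEMMAS AND PROOFS =====

lemma alnum_white {c : Char} (h : pyAlphanum.contains c = true) :
    pyRoleWhitelist.contains c = true := by
  simp only [pyRoleWhitelist, List.contains_append, h, Bool.true_or]

lemma alnum_white_mem {c : Char} (h : pyAlphanum.contains c = true) :
    c ∈ pyRoleWhitelist := by
  simpa using alnum_white h

lemma reTail_eq (l : List Char) (h : l ≠ []) :
    reTail l = (l.all (fun c => pyRoleWhitelist.contains c)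
                && pyAlphanum.contains (l.getLast h)) := by
  induction l with
  | nil => exact absurd rfl h
  | cons c rest ih =>
    cases rest with
    | nil =>
      simp only [reTail, List.all_cons, List.all_nil, List.getLast, Bool.and_true]
      cases hc : pyAlphanum.contains c with
      | false => simp
      | true => simp [alnum_white_mem hc]
    | cons c' rs =>
      simp only [reTail, List.all_cons, List.getLast, ih (by simp)]
      ac_rfl

-- ===== VERDICT (by name: the statement is the Claim_ definition above) =====
theorem roleidwhite_spec : Claim_equal_roleidwhite := by
  intro inps _
  unfold Spec_roleidwhite roleidwhite roleidwhite_alt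
  cases hl : inps.toList with
  | nil => simp
  | cons c0 rest =>
    simp only [List.isEmpty_cons, Bool.false_eq_true, if_false]
    by_cases hefs : inps = "efsnfsproxy"
    · simp [hefs]
    · simp only [hefs, if_false]
      cases rest with
      | nil =>
        simp only [reRole, List.isEmpty_nil, Bool.true_or, Bool.and_true, List.getLast,
          List.all_cons, List.all_nil]
        cases hc : pyAlphanum.contains c0 with
        | false => simp
        | true => simp [alnum_white_mem hc]
      | cons c1 rs =>
        simp only [reRole, List.isEmpty_cons, Bool.false_or,
          reTail_eq (c1 :: rs) (by simp), List.getLast, List.all_cons]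
        cases hc : pyAlphanum.contains c0 with
        | false => simp
        | true =>
          cases hlast : pyAlphanum.contains ((c1 :: rs).getLast (by simp)) with
          | false => simp
          | true => simp [alnum_white_mem hc]
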